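-- pv_equiv track=rewrite | github.com/Pudidil-dev/Manga-Translator | bubble_split.py | merge_overlapping_regions
-- ===== SOURCE A (Python) =====
-- from typing import List, Dict, Tuple
--
-- def merge_overlapping_regions(
--     regions: List[List[int]],
--     y_threshold: int = 20
-- ) -> List[List[int]]:
--     """
--     Merge regions that overlap vertically.
--     """
--     if len(regions) <= 1:
--         return regions
--
--     # Sort by Y position
--     regions = sorted(regions, key=lambda r: r[1])
--
--     merged = [regions[0]]
--
--     for current in regions[1:]:
--         last = merged[-1]
--         last_bottom = last[1] + last[3]
--         current_top = current[1]
--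
--         # Check if regions overlap or are very close
--         if current_top <= last_bottom + y_threshold:
--             # Merge: extend the last region
--             new_bottom = max(last_bottom, current[1] + current[3])
--             new_x = min(last[0], current[0])
--             new_right = max(last[0] + last[2], current[0] + current[2])
--
--             merged[-1] = [
--                 new_x,
--                 last[1],
--                 new_right - new_x,
--                 new_bottom - last[1]
--             ]
--         else:
--             merged.append(current)
--
--     return merged
-- ===== SOURCE B (Python) =====
-- def merge_overlapping_regions(regions, y_threshold=20):
--     if len(regions) <= 1:
--         return regions
--
--     regions = sorted(regions, key=lambda r: r[1])
--
--     # Pass 1: partition into groups of vertically chained regions.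
--     groups = []
--     cur = [regions[0]]
--     bottom = regions[0][1] + regions[0][3]
--     for r in regions[1:]:
--         if r[1] <= bottom + y_threshold:
--             cur.append(r)
--             bottom = max(bottom, r[1] + r[3])
--         else:
--             groups.append(cur)
--             cur = [r]
--             bottom = r[1] + r[3]
--     groups.append(cur)
--
--     # Pass 2: reduce each group to its bounding box (singletons stay as-is).
--     out = []
--     for g in groups:
--         if len(g) == 1:
--             out.append(g[0])
--         else:
--             x = min(r[0] for r in g)
--             top = g[0][1]
--             right = max(r[0] + r[2] for r in g)
--             bot = max(r[1] + r[3] for r in g)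
--             out.append([x, top, right - x, bot - top])
--     return out
-- ===== Notes on version B (the rewrite author's own statement) =====
-- stated objective: alternative
-- what changed: Replaces A's single fold that keeps rewriting merged[-1] into a running bounding box with a two-pass decomposition: first partition the y-sorted regions into chained groups (tracking only the running bottom), then reduce each group to its bounding box via min/max over the whole group (singleton groups are returned unchanged).
-- outside the precondition, e.g. on merge_overlapping_regions([[0, 0, 1, 1], [0, 100]], 20): A returns [[0, 0, 1, 1], [0, 100]], B raises IndexError
import Mathlib
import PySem

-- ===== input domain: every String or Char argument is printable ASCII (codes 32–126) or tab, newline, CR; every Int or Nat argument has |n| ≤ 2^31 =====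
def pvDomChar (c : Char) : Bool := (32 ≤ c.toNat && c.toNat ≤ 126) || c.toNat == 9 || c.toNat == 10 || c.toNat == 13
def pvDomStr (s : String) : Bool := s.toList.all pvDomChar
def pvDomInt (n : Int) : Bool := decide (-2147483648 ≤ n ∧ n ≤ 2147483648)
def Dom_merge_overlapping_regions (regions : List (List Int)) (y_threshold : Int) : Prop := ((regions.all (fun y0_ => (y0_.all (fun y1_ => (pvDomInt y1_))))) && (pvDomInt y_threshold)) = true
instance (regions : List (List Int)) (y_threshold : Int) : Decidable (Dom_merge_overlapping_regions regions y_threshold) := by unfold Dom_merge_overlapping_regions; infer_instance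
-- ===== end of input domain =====

-- B replaces A's single fold that rewrites merged[-1] in place by a two-pass decomposition
-- (partition into y-chained groups, then reduce each group to its bounding box); equivalence
-- of the RETURN values is proved on Pre_ (all regions have ≥ 4 entries, or the list has ≤ 1 element).


-- shared field accessors: r[0], r[1], r[0]+r[2], r[1]+r[3] (valid under Pre_, where every region has ≥ 4 entries)
def pvLeft (r : List Int) : Int := PySem.List.pyGetD r 0 0
def pvTop (r : List Int) : Int := PySem.List.pyGetD r 1 0
def pvRight (r : List Int) : Int := PySem.List.pyGetD r 0 0 + PySem.List.pyGetD r 2 0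
def pvBot (r : List Int) : Int := PySem.List.pyGetD r 1 0 + PySem.List.pyGetD r 3 0

-- ===== PORT A =====
-- the loop body: state = (merged[:-1], merged[-1])
def pvAStep (y_threshold : Int) (st : List (List Int) × List Int) (current : List Int) : List (List Int) × List Int :=
  let last := st.2
  let last_bottom := pvBot last
  let current_top := pvTop current
  if current_top ≤ last_bottom + y_threshold then
    let new_bottom := max last_bottom (pvBot current)
    let new_x := min (pvLeft last) (pvLeft current)
    let new_right := max (pvRight last) (pvRight current)
    (st.1, [new_x, pvTop last, new_right - new_x, new_bottom - pvTop last])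
  else
    (st.1 ++ [last], current)

def merge_overlapping_regions (regions : List (List Int)) (y_threshold : Int) : List (List Int) :=
  if regions.length ≤ 1 then regions
  else
    match PySem.List.sorted regions (fun r => PySem.List.pyGetD r 1 0) with
    | [] => []  -- unreachable: regions has ≥ 2 elements
    | h :: t =>
      let st := t.foldl (pvAStep y_threshold) ([], h)
      st.1 ++ [st.2]

-- ===== PORT B =====
-- pass 1: partition the sorted regions into vertically chained groups, tracking the running bottom
def pvGroupLoop (y_threshold : Int) (rest : List (List Int)) (cur : List (List Int)) (bottom : Int) : List (List (List Int)) :=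
  match rest with
  | [] => [cur]
  | r :: rs =>
    if pvTop r ≤ bottom + y_threshold then
      pvGroupLoop y_threshold rs (cur ++ [r]) (max bottom (pvBot r))
    else
      cur :: pvGroupLoop y_threshold rs [r] (pvBot r)

-- pass 2: reduce one group to its bounding box (a singleton group stays as-is)
def pvReduce (g : List (List Int)) : List Int :=
  match g with
  | [] => []
  | r :: rs =>
    if rs = [] then r
    else
      let x := rs.foldl (fun a t => min a (pvLeft t)) (pvLeft r)
      let right := rs.foldl (fun a t => max a (pvRight t)) (pvRight r)
      let bot := rs.foldl (fun a t => max a (pvBot t)) (pvBot r)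
      [x, pvTop r, right - x, bot - pvTop r]

def merge_overlapping_regions_alt (regions : List (List Int)) (y_threshold : Int) : List (List Int) :=
  if regions.length ≤ 1 then regions
  else
    match PySem.List.sorted regions (fun r => PySem.List.pyGetD r 1 0) with
    | [] => []  -- unreachable: regions has ≥ 2 elements
    | h :: t => (pvGroupLoop y_threshold t [h] (pvBot h)).map pvReduce

-- ===== PRECONDITION & SPEC =====
-- Pre_ excludes lists of ≥ 2 regions containing a region with fewer than 4 entries: Python A raises
-- IndexError on almost all of them, and B itself raises IndexError on the remainder (a final short
-- region that A never inspects because it starts no merge).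
def Pre_merge_overlapping_regions (regions : List (List Int)) (y_threshold : Int) : Prop :=
  regions.length ≤ 1 ∨ ∀ r ∈ regions, 4 ≤ r.length
instance (regions : List (List Int)) (y_threshold : Int) : Decidable (Pre_merge_overlapping_regions regions y_threshold) := by unfold Pre_merge_overlapping_regions; infer_instance
def pvWitness_merge_overlapping_regions : List (List Int) × Int := ([[0, 0, 2, 2], [0, 1, 2, 2], [0, 50, 3, 3]], 20)

def Spec_merge_overlapping_regions (regions : List (List Int)) (y_threshold : Int) (out : List (List Int)) : Prop := out = merge_overlapping_regions_alt regions y_threshold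
instance (regions : List (List Int)) (y_threshold : Int) (out : List (List Int)) : Decidable (Spec_merge_overlapping_regions regions y_threshold out) := by unfold Spec_merge_overlapping_regions; infer_instance

-- ===== CLAIM (what is proved, stated in full; the proofs are below) =====
def Claim_equal_merge_overlapping_regions : Prop := ∀ (regions : List (List Int)) (y_threshold : Int), Dom_merge_overlapping_regions regions y_threshold → Pre_merge_overlapping_regions regions y_threshold → Spec_merge_overlapping_regions regions y_threshold (merge_overlapping_regions regions y_threshold)

-- ===== LEMMAS AND PROOFS =====

-- group statistics: running min of lefts, max of rights, max of bottoms (proof-side only)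
def pvGX : List (List Int) → Int
  | [] => 0
  | r :: rs => rs.foldl (fun a t => min a (pvLeft t)) (pvLeft r)
def pvGR : List (List Int) → Int
  | [] => 0
  | r :: rs => rs.foldl (fun a t => max a (pvRight t)) (pvRight r)
def pvGB : List (List Int) → Int
  | [] => 0
  | r :: rs => rs.foldl (fun a t => max a (pvBot t)) (pvBot r)

lemma pvReduce_top (r : List Int) (rs : List (List Int)) : pvTop (pvReduce (r :: rs)) = pvTop r := by
  cases rs with
  | nil => rfl
  | cons s ss => simp [pvReduce, pvTop, PySem.List.pyGetD, PySem.List.pyGet?, PySem.List.pyIdx?]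

lemma pvReduce_left (r : List Int) (rs : List (List Int)) : pvLeft (pvReduce (r :: rs)) = pvGX (r :: rs) := by
  cases rs with
  | nil => rfl
  | cons s ss => simp [pvReduce, pvLeft, pvGX, PySem.List.pyGetD, PySem.List.pyGet?, PySem.List.pyIdx?]

lemma pvReduce_right (r : List Int) (rs : List (List Int)) : pvRight (pvReduce (r :: rs)) = pvGR (r :: rs) := by
  cases rs with
  | nil => rfl
  | cons s ss =>
    simp [pvReduce, pvRight, pvLeft, pvGR, pvGX, PySem.List.pyGetD, PySem.List.pyGet?, PySem.List.pyIdx?]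

lemma pvReduce_bot (r : List Int) (rs : List (List Int)) : pvBot (pvReduce (r :: rs)) = pvGB (r :: rs) := by
  cases rs with
  | nil => rfl
  | cons s ss =>
    simp [pvReduce, pvBot, pvTop, pvGB, PySem.List.pyGetD, PySem.List.pyGet?, PySem.List.pyIdx?]

lemma pvGB_append (r c : List Int) (rs : List (List Int)) :
    pvGB ((r :: rs) ++ [c]) = max (pvGB (r :: rs)) (pvBot c) := by
  simp [pvGB, List.foldl_append]

lemma pvReduce_append (r c : List Int) (rs : List (List Int)) :
    pvReduce ((r :: rs) ++ [c]) =
      [min (pvGX (r :: rs)) (pvLeft c), pvTop r,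
       max (pvGR (r :: rs)) (pvRight c) - min (pvGX (r :: rs)) (pvLeft c),
       max (pvGB (r :: rs)) (pvBot c) - pvTop r] := by
  simp [pvReduce, pvGX, pvGR, pvGB, List.foldl_append]

-- main loop invariant: A's fold over the tail equals the group partition mapped through pvReduce
lemma pvLoopEq (th : Int) (t : List (List Int)) : ∀ (closed : List (List Int)) (r : List Int) (rs : List (List Int)),
    (t.foldl (pvAStep th) (closed, pvReduce (r :: rs))).1 ++ [(t.foldl (pvAStep th) (closed, pvReduce (r :: rs))).2]
      = closed ++ (pvGroupLoop th t (r :: rs) (pvGB (r :: rs))).map pvReduce := by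
  induction t with
  | nil => intro closed r rs; simp [pvGroupLoop]
  | cons c t ih =>
    intro closed r rs
    have hstep : pvAStep th (closed, pvReduce (r :: rs)) c =
        if pvTop c ≤ pvGB (r :: rs) + th then
          (closed, pvReduce ((r :: rs) ++ [c]))
        else (closed ++ [pvReduce (r :: rs)], c) := by
      rw [pvReduce_append]
      simp only [pvAStep, pvReduce_bot, pvReduce_top, pvReduce_left, pvReduce_right]
    by_cases h : pvTop c ≤ pvGB (r :: rs) + th
    · rw [List.foldl_cons, hstep, if_pos h]
      rw [pvGroupLoop, if_pos h, ← pvGB_append r c rs]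
      exact ih closed r (rs ++ [c])
    · rw [List.foldl_cons, hstep, if_neg h]
      rw [pvGroupLoop, if_neg h]
      have := ih (closed ++ [pvReduce (r :: rs)]) c []
      simp only [pvGB, List.foldl_nil] at this ⊢
      rw [show pvReduce [c] = c from rfl] at this
      rw [this]
      simp [List.map_cons]

-- ===== VERDICT (by name: the statement is the Claim_ definition above) =====
theorem merge_overlapping_regions_spec : Claim_equal_merge_overlapping_regions := by
  intro regions y_threshold _ _
  unfold Spec_merge_overlapping_regions merge_overlapping_regions merge_overlapping_regions_alt
  by_cases hlen : regions.length ≤ 1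
  · simp [hlen]
  · simp only [if_neg hlen]
    cases hs : PySem.List.sorted regions (fun r => PySem.List.pyGetD r 1 0) with
    | nil => rfl
    | cons h t =>
      have := pvLoopEq y_threshold t [] h []
      simpa [pvGB, show pvReduce [h] = h from rfl, pvBot] using this
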